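-- pv_equiv track=rewrite | github.com/bep1s69/BIoInformatics | Project_L5/Assignment2/2.py | debruijn_assembly
-- ===== SOURCE A (Python) =====
-- from collections import defaultdict
--
-- def debruijn_assembly(samples, k=21):
--     if not samples:
--         return ""
--     graph = defaultdict(list)
--     for read in samples:
--         for i in range(len(read) - k + 1):
--             kmer = read[i:i+k]
--             prefix, suffix = kmer[:-1], kmer[1:]
--             graph[prefix].append(suffix)
--     if not graph:
--         return samples[0] if samples else ""
--     start = next(iter(graph))
--     stack = [start]
--     path = []
--     while stack:
--         node = stack[-1]
--         if graph[node]: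
--             stack.append(graph[node].pop())
--         else:
--             path.append(stack.pop())
--     path.reverse()
--     result = path[0]
--     for node in path[1:]:
--         result += node[-1]
--     return result
-- ===== SOURCE B (Python) =====
-- def debruijn_assembly(samples, k=21):
--     if not samples:
--         return ""
--     pairs = [(read[i:i+k][:-1], read[i:i+k][1:])
--              for read in samples for i in range(len(read) - k + 1)]
--     adj = {}
--     for p, s in pairs:
--         adj.setdefault(p, []).append(s)
--     if not adj:
--         return samples[0]
--     rpath = []
--
--     def visit(v):
--         while adj.get(v):
--             visit(adj[v].pop())
--         rpath.append(v)
--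
--     visit(next(iter(adj)))
--     # rpath is the Eulerian path back-to-front (post-order of the recursion)
--     return rpath[-1] + ''.join(v[-1] for v in reversed(rpath[:-1]))
-- ===== Notes on version B (the rewrite author's own statement) =====
-- stated objective: alternative
-- what changed: B replaces A's explicit-stack loop simulation by a recursive Hierholzer traversal (a visit helper that recurses on popped edges and post-order-appends the node), builds the edge list by one flat comprehension plus setdefault grouping instead of nested defaultdict loops, and assembles the contig from the back-to-front post-order list instead of materialising, reversing and re-scanning the path.
-- outside the precondition, e.g. on debruijn_assembly(['abcd'], -2): A returns 'abc', B returns 'abc'; on debruijn_assembly([''], 1): A returns '', B returns ''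
import Mathlib
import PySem

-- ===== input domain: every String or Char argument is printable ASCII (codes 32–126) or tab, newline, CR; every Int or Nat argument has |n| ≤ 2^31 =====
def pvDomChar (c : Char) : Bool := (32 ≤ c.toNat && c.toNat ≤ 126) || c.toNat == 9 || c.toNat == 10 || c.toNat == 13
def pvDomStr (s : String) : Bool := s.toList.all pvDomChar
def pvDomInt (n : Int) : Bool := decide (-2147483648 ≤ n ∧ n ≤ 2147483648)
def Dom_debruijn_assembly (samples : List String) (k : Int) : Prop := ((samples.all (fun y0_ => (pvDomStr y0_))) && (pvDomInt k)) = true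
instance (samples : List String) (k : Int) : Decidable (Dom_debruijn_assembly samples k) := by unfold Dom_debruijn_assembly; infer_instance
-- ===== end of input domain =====

-- B runs the same-order Eulerian traversal recursively (a visit helper recursing on popped edges with
-- post-order appends) instead of A's explicit-stack loop, builds the edge list flat with setdefault
-- grouping, and assembles the contig from the back-to-front post-order list; objective: alternative
-- (same asymptotic cost; return-value equivalence only).


-- ===== PORT A =====
-- node[-1] as a 1-char string; the 'none' (IndexError) branch is excluded by Pre_ (k ≥ 2 makes every node nonempty)
def pvLastA (node : String) : String := String.ofList [(PySem.Str.pyGet? node (-1)).getD '?']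

-- total edges = sum of adjacency-list lengths; used only as the loops' fuel bound
def pvEdges (items : List (String × List String)) : Nat := (items.map (fun p => p.2.length)).sum

def pvBuildA (samples : List String) (k : Int) : PySem.Dict String (List String) :=
  samples.foldl (fun g read =>
    (PySem.List.pyRange 0 (PySem.Str.len read - k + 1) 1).foldl (fun g2 i =>
      let kmer := PySem.Str.slice read (some i) (some (i + k))
      let pre := PySem.Str.slice kmer none (some (-1))
      let suf := PySem.Str.slice kmer (some 1) none
      g2.insert pre (g2.getD pre [] ++ [suf])) g) PySem.Dict.empty

-- the while loop; 'path' is accumulated consed, i.e. it is python's path already reversed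
def pvLoopA : Nat → PySem.Dict String (List String) → List String → List String → List String
  | 0, _, _, path => path
  | _+1, _, [], path => path
  | n+1, g, node :: stk, path =>
    let l := g.getD node []
    if h : l = [] then pvLoopA n g stk (node :: path)
    else pvLoopA n (g.insert node l.dropLast) (l.getLast h :: node :: stk) path

def debruijn_assembly (samples : List String) (k : Int) : String :=
  if samples = [] then "" else
  let graph := pvBuildA samples k
  if graph.items = [] then (match samples with | [] => "" | s :: _ => s) else
  match graph.keys with
  | [] => ""          -- unreachable: graph is nonempty here
  | start :: _ =>
    match pvLoopA (2 * pvEdges graph.items + 2) graph [start] [] with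
    | [] => ""        -- unreachable: the stack starts nonempty
    | p0 :: rest => rest.foldl (fun acc node => acc ++ pvLastA node) p0

-- ===== PORT B =====
-- v[-1] as a Char; the 'none' (IndexError) branch is excluded by Pre_
def pvLastB (v : String) : Char := (PySem.Str.pyGet? v (-1)).getD '?'

def pvPairsB (samples : List String) (k : Int) : List (String × String) :=
  samples.flatMap (fun read =>
    (PySem.List.pyRange 0 (PySem.Str.len read - k + 1) 1).map (fun i =>
      (PySem.Str.slice (PySem.Str.slice read (some i) (some (i + k))) none (some (-1)),
       PySem.Str.slice (PySem.Str.slice read (some i) (some (i + k))) (some 1) none)))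

-- adj.setdefault(p, []).append(s)
def pvAdjB (pairs : List (String × String)) : PySem.Dict String (List String) :=
  pairs.foldl (fun d ps => d.insert ps.1 (d.getD ps.1 [] ++ [ps.2])) PySem.Dict.empty

-- the recursive visit helper; rpath is accumulated consed, so the final list is python's
-- reversed(rpath) already (the Eulerian path front-to-back).  One fuel unit per call;
-- 2*edges+1 suffices (proved in the lockstep lemma below).
def pvVisitB : Nat → PySem.Dict String (List String) → String → List String → PySem.Dict String (List String) × List String
  | 0, g, _, r => (g, r)          -- fuel-out, unreachable with the fuel the port supplies
  | n+1, g, v, r =>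
    let l := g.getD v []
    if h : l = [] then (g, v :: r)
    else
      let p := pvVisitB n (g.insert v l.dropLast) (l.getLast h) r
      pvVisitB n p.1 v p.2

def debruijn_assembly_alt (samples : List String) (k : Int) : String :=
  if samples = [] then "" else
  let adj := pvAdjB (pvPairsB samples k)
  if adj.items = [] then samples.headD "" else
  match adj.keys with
  | [] => ""          -- unreachable: adj is nonempty here
  | start :: _ =>
    match pvVisitB (2 * (pvPairsB samples k).length + 1) adj start [] with
    | (_, p0 :: rest) => p0 ++ String.ofList (rest.map pvLastB)
    | (_, []) => ""   -- unreachable: visit always appends its argument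

-- ===== PRECONDITION & SPEC =====
-- Pre_ restricts k to the natural k-mer sizes k ≥ 2 (any k is fine when samples is empty): for k ≤ 1 the
-- k-mers are empty or produced by Python's negative-slice wraparound, and both A and B raise IndexError on
-- most such inputs (node[-1] on an empty node).
def Pre_debruijn_assembly (samples : List String) (k : Int) : Prop := 2 ≤ k ∨ samples = []
instance (samples : List String) (k : Int) : Decidable (Pre_debruijn_assembly samples k) := by unfold Pre_debruijn_assembly; infer_instance
def pvWitness_debruijn_assembly : List String × Int := (["abcab"], 3)
def Spec_debruijn_assembly (samples : List String) (k : Int) (out : String) : Prop := out = debruijn_assembly_alt samples k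
instance (samples : List String) (k : Int) (out : String) : Decidable (Spec_debruijn_assembly samples k out) := by unfold Spec_debruijn_assembly; infer_instance

-- ===== CLAIM (what is proved, stated in full; the proofs are below) =====
def Claim_equal_debruijn_assembly : Prop := ∀ (samples : List String) (k : Int), Dom_debruijn_assembly samples k → Pre_debruijn_assembly samples k → Spec_debruijn_assembly samples k (debruijn_assembly samples k)

-- ===== LEMMAS AND PROOFS =====

lemma pvKeys_insert_of_contains (d : PySem.Dict String (List String)) (v : String) (w : List String)
    (h : d.contains v = true) : (d.insert v w).keys = d.keys := by
  simp only [PySem.Dict.insert, h, if_pos, PySem.Dict.keys, List.map_map]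
  apply List.map_congr_left
  intro p _
  by_cases hb : p.1 = v
  · simp [hb]
  · simp [hb]

lemma pvKeys_nodup_insert (d : PySem.Dict String (List String)) (v : String) (w : List String)
    (h : d.keys.Nodup) : (d.insert v w).keys.Nodup := by
  by_cases hc : d.contains v = true
  · rw [pvKeys_insert_of_contains d v w hc]; exact h
  · have hv : v ∉ d.keys := by
      intro hmem
      exact hc ((PySem.Dict.contains_iff_mem_keys d v).2 hmem)
    simp only [PySem.Dict.insert, hc, if_neg, Bool.false_eq_true, not_false_iff,
      PySem.Dict.keys, List.map_append, List.map_cons, List.map_nil]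
    simp only [List.nodup_append]
    refine ⟨h, by simp, ?_⟩
    intro a ha b hb
    simp only [List.mem_singleton] at hb
    subst hb
    intro hav
    exact hv (hav ▸ ha)

-- replacing (or appending) the value at a key changes the edge sum by the difference of list lengths
lemma pvEdges_insert (items : List (String × List String)) (hnd : (items.map (fun p => p.1)).Nodup)
    (key : String) (w : List String) :
    pvEdges ((PySem.Dict.mk items).insert key w).items + ((PySem.Dict.mk items).getD key []).length
      = pvEdges items + w.length := by
  induction items with
  | nil =>
    simp [PySem.Dict.insert, PySem.Dict.contains, PySem.Dict.getD, PySem.Dict.get?, pvEdges]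
  | cons a rest ih =>
    simp only [List.map_cons, List.nodup_cons] at hnd
    obtain ⟨hna, hndr⟩ := hnd
    by_cases hb : a.1 = key
    · have hcon : (PySem.Dict.mk (a :: rest)).contains key = true := by
        simp [PySem.Dict.contains, hb]
      have hrest : List.map (fun p => if (p.1 == key) = true then (key, w) else p) rest = rest := by
        have hmc : List.map (fun p => if (p.1 == key) = true then (key, w) else p) rest
            = List.map id rest := by
          apply List.map_congr_left
          intro p hp
          have hne : p.1 ≠ key := by
            intro he
            exact hna (by simpa [he, hb] using List.mem_map_of_mem (f := fun p => p.1) hp)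
          simp [hne]
        simpa using hmc
      have hmap : ((PySem.Dict.mk (a :: rest)).insert key w).items = (key, w) :: rest := by
        simp only [PySem.Dict.insert, hcon, if_pos, List.map_cons, hrest]
        simp [hb]
      have hget : (PySem.Dict.mk (a :: rest)).getD key [] = a.2 := by
        simp [PySem.Dict.getD, PySem.Dict.get?, hb]
      rw [hmap, hget]
      simp only [pvEdges, List.map_cons, List.sum_cons]
      omega
    · have hb' : (a.1 == key) = false := by simpa using hb
      have hitems : ((PySem.Dict.mk (a :: rest)).insert key w).items
          = a :: ((PySem.Dict.mk rest).insert key w).items := by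
        simp only [PySem.Dict.insert, PySem.Dict.contains]
        cases hrc : (List.any rest fun p => p.1 == key) with
        | true => simp [hb', hrc, hb]
        | false => simp [hb', hrc]
      have hget : (PySem.Dict.mk (a :: rest)).getD key [] = (PySem.Dict.mk rest).getD key [] := by
        simp [PySem.Dict.getD, PySem.Dict.get?, hb']
      rw [hitems, hget]
      simp only [pvEdges, List.map_cons, List.sum_cons]
      have := ih hndr
      simp only [pvEdges] at this
      omega

lemma pvBuild_gen (samples : List String) (k : Int) (d : PySem.Dict String (List String)) :
    samples.foldl (fun g read =>
      (PySem.List.pyRange 0 (PySem.Str.len read - k + 1) 1).foldl (fun g2 i =>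
        let kmer := PySem.Str.slice read (some i) (some (i + k))
        let pre := PySem.Str.slice kmer none (some (-1))
        let suf := PySem.Str.slice kmer (some 1) none
        g2.insert pre (g2.getD pre [] ++ [suf])) g) d
    = (pvPairsB samples k).foldl (fun d2 ps => d2.insert ps.1 (d2.getD ps.1 [] ++ [ps.2])) d := by
  induction samples generalizing d with
  | nil => rfl
  | cons read rest ih =>
    simp only [pvPairsB, List.flatMap_cons, List.foldl_append, List.foldl_cons, List.foldl_map]
    simp only [pvPairsB] at ih
    rw [← ih]

lemma pvBuild_eq (samples : List String) (k : Int) :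
    pvBuildA samples k = pvAdjB (pvPairsB samples k) := by
  simpa only [pvBuildA, pvAdjB] using pvBuild_gen samples k PySem.Dict.empty

lemma pvAdjB_nodup_edges (pairs : List (String × String)) (d : PySem.Dict String (List String))
    (hnd : d.keys.Nodup) :
    (pairs.foldl (fun d2 ps => d2.insert ps.1 (d2.getD ps.1 [] ++ [ps.2])) d).keys.Nodup ∧
    pvEdges ((pairs.foldl (fun d2 ps => d2.insert ps.1 (d2.getD ps.1 [] ++ [ps.2])) d).items)
      = pvEdges d.items + pairs.length := by
  induction pairs generalizing d with
  | nil => simpa using hnd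
  | cons p rest ih =>
    have hnd' : (d.insert p.1 (d.getD p.1 [] ++ [p.2])).keys.Nodup :=
      pvKeys_nodup_insert d p.1 _ hnd
    have hkeys : (d.items.map (fun q => q.1)).Nodup := by
      simpa [PySem.Dict.keys] using hnd
    have he := pvEdges_insert d.items hkeys p.1 (d.getD p.1 [] ++ [p.2])
    obtain ⟨h1, h2⟩ := ih _ hnd'
    refine ⟨by simpa using h1, ?_⟩
    simp only [List.foldl_cons] at *
    have he' : pvEdges ((d.insert p.1 (d.getD p.1 [] ++ [p.2])).items) + (d.getD p.1 []).length
        = pvEdges d.items + (d.getD p.1 [] ++ [p.2]).length := he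
    have hlen : (d.getD p.1 [] ++ [p.2]).length = (d.getD p.1 []).length + 1 := by simp
    simp only [List.length_cons]
    omega

lemma pvLoopA_nil (n : Nat) (g : PySem.Dict String (List String)) (P : List String) :
    pvLoopA n g [] P = P := by cases n <;> rfl

-- THE LOCKSTEP LEMMA: visiting one node recursively (B) produces exactly the path segment that
-- A's stack loop emits while that node is on top, consumes the same edges, and A's loop spends
-- exactly 2*(edges consumed)+1 fuel on it.  Strong induction on the number of edges.
lemma pvLockstep (E : Nat) : ∀ (g : PySem.Dict String (List String)), g.keys.Nodup →
    pvEdges g.items = E → ∀ node : String,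
    ∃ g' seg, g'.keys.Nodup ∧ pvEdges g'.items ≤ E ∧
      (∀ (nB : Nat) (r : List String), 2*E+1 ≤ nB → pvVisitB nB g node r = (g', seg ++ r)) ∧
      (∀ (nA : Nat) (stk r : List String), 2*E + stk.length + 2 ≤ nA →
        pvLoopA nA g (node :: stk) r
          = pvLoopA (nA - (2*(E - pvEdges g'.items) + 1)) g' stk (seg ++ r)) := by
  induction E using Nat.strong_induction_on with
  | _ E ih =>
    intro g hnd hE node
    by_cases hl : g.getD node [] = []
    · refine ⟨g, [node], hnd, le_of_eq hE, ?_, ?_⟩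
      · intro nB r h
        cases nB with
        | zero => omega
        | succ t =>
          simp only [pvVisitB]
          rw [dif_pos hl]
          rfl
      · intro nA stk r h
        cases nA with
        | zero => omega
        | succ m =>
          simp only [pvLoopA]
          rw [dif_pos hl]
          have hfe : m + 1 - (2*(E - pvEdges g.items) + 1) = m := by
            rw [hE]; omega
          rw [hfe]
          rfl
    · have hnd1 : (g.insert node ((g.getD node []).dropLast)).keys.Nodup :=
        pvKeys_nodup_insert g node _ hnd
      have hk : (g.items.map (fun q => q.1)).Nodup := by simpa [PySem.Dict.keys] using hnd
      have he : pvEdges ((g.insert node ((g.getD node []).dropLast)).items)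
            + (g.getD node []).length
          = pvEdges g.items + ((g.getD node []).dropLast).length :=
        pvEdges_insert g.items hk node ((g.getD node []).dropLast)
      have hlp : 1 ≤ (g.getD node []).length := List.length_pos_iff.2 hl
      have hdl : ((g.getD node []).dropLast).length = (g.getD node []).length - 1 := by simp
      have hE1 : pvEdges (g.insert node ((g.getD node []).dropLast)).items + 1 = E := by
        rw [hE] at he; omega
      obtain ⟨g2, seg2, hnd2, hle2, hv2, hloop2⟩ :=
        ih (pvEdges (g.insert node ((g.getD node []).dropLast)).items) (by omega)
          (g.insert node ((g.getD node []).dropLast)) hnd1 rfl ((g.getD node []).getLast hl)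
      obtain ⟨g3, seg3, hnd3, hle3, hv3, hloop3⟩ :=
        ih (pvEdges g2.items) (by omega) g2 hnd2 rfl node
      refine ⟨g3, seg3 ++ seg2, hnd3, by omega, ?_, ?_⟩
      · intro nB r h
        cases nB with
        | zero => omega
        | succ t =>
          simp only [pvVisitB]
          rw [dif_neg hl]
          rw [hv2 t r (by omega)]
          rw [hv3 t (seg2 ++ r) (by omega)]
          rw [List.append_assoc]
      · intro nA stk r h
        cases nA with
        | zero => omega
        | succ m =>
          simp only [pvLoopA]
          rw [dif_neg hl]
          rw [hloop2 m (node :: stk) r (by simp only [List.length_cons]; omega)]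
          rw [hloop3 (m - (2*(pvEdges (g.insert node ((g.getD node []).dropLast)).items
              - pvEdges g2.items) + 1)) stk (seg2 ++ r) (by omega)]
          rw [← List.append_assoc]
          congr 1
          omega

lemma pvFoldl_lastA (r : List String) (h : String) :
    r.foldl (fun acc node => acc ++ pvLastA node) h = h ++ String.ofList (r.map pvLastB) := by
  induction r generalizing h with
  | nil => simp
  | cons a rest ih =>
    simp only [List.foldl_cons, List.map_cons, ih]
    rw [String.append_assoc]
    congr 1
    rw [show (pvLastB a :: List.map pvLastB rest) = [pvLastB a] ++ List.map pvLastB rest from rfl,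
      String.ofList_append]
    rfl

-- ===== VERDICT (by name: the statement is the Claim_ definition above) =====
theorem debruijn_assembly_spec : Claim_equal_debruijn_assembly := by
  intro samples k _hdom _hpre
  unfold Spec_debruijn_assembly
  by_cases hs : samples = []
  · simp [debruijn_assembly, debruijn_assembly_alt, hs]
  · have hbuild := pvBuild_eq samples k
    obtain ⟨hnd0, hedges0⟩ := pvAdjB_nodup_edges (pvPairsB samples k) PySem.Dict.empty
      (by simp [PySem.Dict.keys, PySem.Dict.empty])
    have hnd : (pvAdjB (pvPairsB samples k)).keys.Nodup := by simpa [pvAdjB] using hnd0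
    have hE : pvEdges (pvAdjB (pvPairsB samples k)).items = (pvPairsB samples k).length := by
      simpa [pvAdjB, PySem.Dict.empty, pvEdges] using hedges0
    simp only [debruijn_assembly, debruijn_assembly_alt, hs, hbuild, ite_false]
    by_cases hi : (pvAdjB (pvPairsB samples k)).items = []
    · simp only [hi]
      cases samples with
      | nil => exact absurd rfl hs
      | cons s ss => rfl
    · simp only [hi, ite_false]
      cases hk : (pvAdjB (pvPairsB samples k)).keys with
      | nil =>
        exfalso
        apply hi
        have : (pvAdjB (pvPairsB samples k)).items.map (fun p => p.1) = [] := by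
          simpa [PySem.Dict.keys] using hk
        simpa using List.map_eq_nil_iff.1 this
      | cons start restk =>
        obtain ⟨g', seg, _hnd', hle, hvisit, hloop⟩ :=
          pvLockstep (pvEdges (pvAdjB (pvPairsB samples k)).items)
            (pvAdjB (pvPairsB samples k)) hnd rfl start
        have hA : pvLoopA (2 * pvEdges (pvAdjB (pvPairsB samples k)).items + 2)
            (pvAdjB (pvPairsB samples k)) [start] [] = seg := by
          rw [hloop _ [] [] (by simp)]
          rw [pvLoopA_nil, List.append_nil]
        have hB : pvVisitB (2 * (pvPairsB samples k).length + 1)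
            (pvAdjB (pvPairsB samples k)) start [] = (g', seg) := by
          rw [← hE]
          rw [hvisit _ [] (by omega), List.append_nil]
        dsimp only
        rw [hA, hB]
        cases seg with
        | nil => rfl
        | cons p0 rest => simp only [pvFoldl_lastA]
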